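-- pv_equiv track=rewrite | github.com/akimov246/leetcode | dp.py | fdp
-- ===== SOURCE A (Python) =====
-- def fdp(n):
--     if n < 2:
--         return 1
--     fs = [None] * n
--     fs[0] = fs[1] = 1
--     for i in range(2, n, 1):
--         if i % 2 == 0:
--             fs[i] = fs[i // 2] + fs[i // 2 - 1]
--         else:
--             fs[i] = fs[(i - 1) // 2] + fs[(i - 1) // 2 - 1]
--
--     return fs[n - 1]
-- ===== SOURCE B (Python) =====
-- def fdp(n):
--     # Both of A's branches compute fs[i] = f(i//2) + f(i//2 - 1) (with f(0)=f(1)=1),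
--     # so f(n-1) is computable by halving: a single recursion on m//2 carrying the
--     # window (f(m), f(m-1), f(m-2)) gives the answer in O(log n).
--     if n < 2:
--         return 1
--
--     def triple(m):
--         # returns (f(m), f(m-1), f(m-2)) for m >= 2
--         if m < 4:
--             return (2, 1, 1) if m == 2 else (2, 2, 1)
--         gh, gh1, gh2 = triple(m // 2)
--         if m % 2 == 0:
--             return (gh + gh1, gh1 + gh2, gh1 + gh2)
--         else:
--             return (gh + gh1, gh + gh1, gh1 + gh2)
--
--     k = n - 1
--     if k < 2:
--         return 1
--     return triple(k)[0]
-- ===== Notes on version B (the rewrite author's own statement) =====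
-- stated objective: faster
-- what changed: Replaces the O(n) DP array with a single halving recursion that carries the window (f(m), f(m-1), f(m-2)), since both of A's branches reduce index i to floor(i/2).
import Mathlib
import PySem

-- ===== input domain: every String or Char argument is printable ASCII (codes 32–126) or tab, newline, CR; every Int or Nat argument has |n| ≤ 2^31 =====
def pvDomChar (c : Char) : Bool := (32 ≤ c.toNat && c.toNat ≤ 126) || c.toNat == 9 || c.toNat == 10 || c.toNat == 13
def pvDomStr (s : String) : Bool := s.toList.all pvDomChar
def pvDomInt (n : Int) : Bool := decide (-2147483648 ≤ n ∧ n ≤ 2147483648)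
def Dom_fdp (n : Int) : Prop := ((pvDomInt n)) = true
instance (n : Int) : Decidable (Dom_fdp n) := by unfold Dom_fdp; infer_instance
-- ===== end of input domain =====

-- B replaces A's O(n) DP array with a single halving recursion (asymptotically faster).

-- ===== PORT A =====
-- loop body: 'fs[i] = fs[i//2] + fs[i//2-1]' resp. 'fs[i] = fs[(i-1)//2] + fs[(i-1)//2-1]'.
-- The Python list fs is modeled as an Array Int; every index used (i, i//2, i//2-1, n-1)
-- is nonnegative and in range here, so .toNat / setIfInBounds / [·]?.getD 0 are exact.
def fdpStep (fs : Array Int) (i : Int) : Array Int :=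
  if PySem.Int.mod i 2 = 0 then
    fs.setIfInBounds i.toNat
      (fs[(PySem.Int.floordiv i 2).toNat]?.getD 0 + fs[(PySem.Int.floordiv i 2 - 1).toNat]?.getD 0)
  else
    fs.setIfInBounds i.toNat
      (fs[(PySem.Int.floordiv (i - 1) 2).toNat]?.getD 0 +
       fs[(PySem.Int.floordiv (i - 1) 2 - 1).toNat]?.getD 0)

-- '[None] * n' is modeled as an array of 0s: A never reads an entry before assigning it.
def fdp (n : Int) : Int :=
  if n < 2 then 1
  else
    let fs : Array Int := Array.replicate n.toNat 0
    let fs := (fs.setIfInBounds 0 1).setIfInBounds 1 1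
    let fs := (PySem.List.pyRange 2 n 1).foldl fdpStep fs
    fs[(n - 1).toNat]?.getD 0

-- ===== PORT B =====
-- returns (f(m), f(m-1), f(m-2)) for m ≥ 2
def fdpTriple (m : Int) : Int × Int × Int :=
  if _hm : m < 4 then
    if m = 2 then (2, 1, 1) else (2, 2, 1)
  else
    let t := fdpTriple (PySem.Int.floordiv m 2)
    if PySem.Int.mod m 2 = 0 then
      (t.1 + t.2.1, t.2.1 + t.2.2, t.2.1 + t.2.2)
    else
      (t.1 + t.2.1, t.1 + t.2.1, t.2.1 + t.2.2)
termination_by m.toNat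
decreasing_by
  rw [PySem.Int.floordiv_eq_ediv_of_pos (by omega)]
  omega

def fdp_alt (n : Int) : Int :=
  if n < 2 then 1
  else
    let k := n - 1
    if k < 2 then 1 else (fdpTriple k).1

-- ===== PRECONDITION & SPEC =====
def Spec_fdp (n : Int) (out : Int) : Prop := out = fdp_alt n
instance (n : Int) (out : Int) : Decidable (Spec_fdp n out) := by unfold Spec_fdp; infer_instance

-- ===== CLAIM (what is proved, stated in full; the proofs are below) =====
def Claim_equal_fdp : Prop := ∀ (n : Int), Dom_fdp n → Spec_fdp n (fdp n)

-- ===== LEMMAS AND PROOFS =====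

-- the reference recurrence
def gref (k : Nat) : Int :=
  if k < 2 then 1 else gref (k / 2) + gref (k / 2 - 1)
decreasing_by all_goals omega

theorem gref_lt (k : Nat) (h : k < 2) : gref k = 1 := by
  rw [gref]; simp [h]

theorem gref_ge (k : Nat) (h : 2 ≤ k) : gref k = gref (k / 2) + gref (k / 2 - 1) := by
  rw [gref]; simp [Nat.not_lt.mpr h]

theorem fdpTriple_eq (m : Int) (hm : 2 ≤ m) :
    fdpTriple m = (gref m.toNat, gref (m - 1).toNat, gref (m - 2).toNat) := by
  generalize hk : m.toNat = K
  induction K using Nat.strong_induction_on generalizing m with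
  | _ K ih =>
  subst hk
  have g0 : gref 0 = 1 := gref_lt 0 (by norm_num)
  have g1 : gref 1 = 1 := gref_lt 1 (by norm_num)
  have g2 : gref 2 = 2 := by rw [gref_ge 2 (by norm_num)]; norm_num [g0, g1]
  have g3 : gref 3 = 2 := by rw [gref_ge 3 (by norm_num)]; norm_num [g0, g1]
  rw [fdpTriple]
  by_cases h4 : m < 4
  · interval_cases m
    · simp only [show ((2:Int)).toNat = 2 from rfl, show ((2:Int)-1).toNat = 1 from rfl,
        show ((2:Int)-2).toNat = 0 from rfl, g0, g1, g2]
      norm_num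
    · simp only [show ((3:Int)).toNat = 3 from rfl, show ((3:Int)-1).toNat = 2 from rfl,
        show ((3:Int)-2).toNat = 1 from rfl, g1, g2, g3]
      norm_num
  · have hd : PySem.Int.floordiv m 2 = m / 2 := PySem.Int.floordiv_eq_ediv_of_pos (by omega)
    have h2 : 2 ≤ m / 2 := by omega
    have htn : (m / 2).toNat < m.toNat := by omega
    have := ih (m / 2).toNat (by omega) (m / 2) h2 rfl
    simp only [h4, dite_false, hd, this]
    have hmod : PySem.Int.mod m 2 = m % 2 := PySem.Int.mod_eq_emod_of_pos (by omega)
    have hm0 : 2 ≤ m.toNat := by omega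
    have e1 : gref m.toNat = gref (m.toNat / 2) + gref (m.toNat / 2 - 1) := gref_ge _ hm0
    have e2 : gref (m - 1).toNat = gref ((m - 1).toNat / 2) + gref ((m - 1).toNat / 2 - 1) :=
      gref_ge _ (by omega)
    have e3 : gref (m - 2).toNat = gref ((m - 2).toNat / 2) + gref ((m - 2).toNat / 2 - 1) :=
      gref_ge _ (by omega)
    by_cases hev : m % 2 = 0
    · have c1 : m.toNat / 2 = (m / 2).toNat := by omega
      have c2 : (m - 1).toNat / 2 = (m / 2).toNat - 1 := by omega
      have c3 : (m - 2).toNat / 2 = (m / 2).toNat - 1 := by omega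
      have d1 : (m / 2 - 1).toNat = (m / 2).toNat - 1 := by omega
      have d2 : (m / 2 - 2).toNat = (m / 2).toNat - 2 := by omega
      have s12 : (m / 2).toNat - 1 - 1 = (m / 2).toNat - 2 := by omega
      simp only [hmod, hev, if_true, e1, e2, e3, c1, c2, c3, d1, d2, s12]
    · have c1 : m.toNat / 2 = (m / 2).toNat := by omega
      have c2 : (m - 1).toNat / 2 = (m / 2).toNat := by omega
      have c3 : (m - 2).toNat / 2 = (m / 2).toNat - 1 := by omega
      have d1 : (m / 2 - 1).toNat = (m / 2).toNat - 1 := by omega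
      have d2 : (m / 2 - 2).toNat = (m / 2).toNat - 2 := by omega
      have s12 : (m / 2).toNat - 1 - 1 = (m / 2).toNat - 2 := by omega
      simp only [hmod, hev, if_false, e1, e2, e3, c1, c2, c3, d1, d2, s12]

theorem loopA (n : Int) (d : Nat) : ∀ (i : Int), 2 ≤ i → i ≤ n → (n - i).toNat = d →
    ∀ fs : Array Int, fs.size = n.toNat →
    (∀ j : Nat, j < i.toNat → fs[j]?.getD 0 = gref j) →
    ∀ j : Nat, j < n.toNat →
      ((PySem.List.pyRange i n 1).foldl fdpStep fs)[j]?.getD 0 = gref j := by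
  induction d with
  | zero =>
    intro i h2 hin hd fs hlen hinv j hj
    have hni : i = n := by omega
    subst hni
    rw [PySem.List.pyRange_one_eq_nil (le_refl i)]
    exact hinv j (by omega)
  | succ d ih =>
    intro i h2 hin hd fs hlen hinv j hj
    have hltn : i < n := by omega
    rw [PySem.List.pyRange_one_cons hltn]
    simp only [List.foldl_cons]
    have hival : gref i.toNat = gref (i.toNat / 2) + gref (i.toNat / 2 - 1) := gref_ge _ (by omega)
    -- after the assignment fs[i] = … the invariant extends to i + 1
    have key : ∀ j : Nat, j < (i + 1).toNat → (fdpStep fs i)[j]?.getD 0 = gref j := by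
      intro j hj
      have hi2 : (PySem.Int.floordiv i 2).toNat = i.toNat / 2 := by
        rw [PySem.Int.floordiv_eq_ediv_of_pos (by omega)]; omega
      have hi2m : (PySem.Int.floordiv i 2 - 1).toNat = i.toNat / 2 - 1 := by
        rw [PySem.Int.floordiv_eq_ediv_of_pos (by omega)]; omega
      have hmod : PySem.Int.mod i 2 = i % 2 := PySem.Int.mod_eq_emod_of_pos (by omega)
      have gv1 : fs[i.toNat / 2]?.getD 0 = gref (i.toNat / 2) := hinv _ (by omega)
      have gv2 : fs[i.toNat / 2 - 1]?.getD 0 = gref (i.toNat / 2 - 1) := hinv _ (by omega)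
      have hset : ∀ v : Int, (fs.setIfInBounds i.toNat v)[j]?.getD 0 =
          if j = i.toNat then v else fs[j]?.getD 0 := by
        intro v
        rw [Array.getElem?_setIfInBounds]
        by_cases hji : i.toNat = j
        · simp [hji, show j < fs.size by omega]
        · rw [if_neg hji, if_neg (fun h : j = i.toNat => hji h.symm)]
      unfold fdpStep
      by_cases hpar : PySem.Int.mod i 2 = 0
      · simp only [hpar, if_true, hi2, hi2m, gv1, gv2, hset]
        by_cases hje : j = i.toNat
        · subst hje
          rw [if_pos rfl, ← hival]
        · simp only [hje, if_false]
          exact hinv j (by omega)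
      · have hi2' : (PySem.Int.floordiv (i - 1) 2).toNat = i.toNat / 2 := by
          rw [PySem.Int.floordiv_eq_ediv_of_pos (by omega)]
          rw [hmod] at hpar
          omega
        have hi2m' : (PySem.Int.floordiv (i - 1) 2 - 1).toNat = i.toNat / 2 - 1 := by
          rw [PySem.Int.floordiv_eq_ediv_of_pos (by omega)]
          rw [hmod] at hpar
          omega
        simp only [hpar, if_false, hi2', hi2m', gv1, gv2, hset]
        by_cases hje : j = i.toNat
        · subst hje
          rw [if_pos rfl, ← hival]
        · simp only [hje, if_false]
          exact hinv j (by omega)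
    exact ih (i + 1) (by omega) (by omega) (by omega) (fdpStep fs i)
      (by unfold fdpStep; split <;> simp [Array.size_setIfInBounds, hlen]) key j hj

theorem fdp_eq (n : Int) : fdp n = if n < 2 then 1 else gref (n - 1).toNat := by
  unfold fdp
  by_cases h : n < 2
  · simp [h]
  · simp only [h, if_false]
    have hp0 : 0 < n.toNat := by omega
    have hp1 : 1 < n.toNat := by omega
    have hlen : (((Array.replicate n.toNat (0:Int)).setIfInBounds 0 1).setIfInBounds 1 1).size
        = n.toNat := by
      simp [Array.size_setIfInBounds, Array.size_replicate]
    have hinit : ∀ j : Nat, j < (2 : Int).toNat →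
        (((Array.replicate n.toNat (0:Int)).setIfInBounds 0 1).setIfInBounds 1 1)[j]?.getD 0
          = gref j := by
      intro j hj
      have hj2 : j < 2 := by omega
      interval_cases j <;>
        simp [Array.getElem?_setIfInBounds, Array.getElem?_replicate, Array.size_setIfInBounds,
          Array.size_replicate, hp0, hp1, gref_lt]
    exact loopA n (n - 2).toNat 2 (by omega) (by omega) (by omega) _ hlen hinit
      (n - 1).toNat (by omega)

theorem fdp_alt_eq (n : Int) : fdp_alt n = if n < 2 then 1 else gref (n - 1).toNat := by
  unfold fdp_alt
  by_cases h : n < 2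
  · simp [h]
  · simp only [h, if_false]
    by_cases hk : n - 1 < 2
    · have h1 : (n - 1).toNat = 1 := by omega
      simp [hk, h1, gref_lt]
    · simp only [hk, if_false]
      rw [fdpTriple_eq (n - 1) (by omega)]

-- ===== VERDICT (by name: the statement is the Claim_ definition above) =====
theorem fdp_spec : Claim_equal_fdp := by
  intro n _
  unfold Spec_fdp
  rw [fdp_eq, fdp_alt_eq]
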